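-- pv_equiv track=rewrite | github.com/S3bastianRom/Andes-Projects | Project1/Project1.py | divisibles
-- ===== SOURCE A (Python) =====
-- def divisibles(num1:int, num2:int)->list:
--     div = []
--     for number in range (1, 101):
--         numero1 = int (num1)
--         numero2 = int (num2)
--         if number % numero1 == 0 and number % numero2 == 0:
--             div.append (number)
--
--     return(div)
-- ===== SOURCE B (Python) =====
-- def divisibles(num1: int, num2: int) -> list:
--     n1 = int(num1)
--     n2 = int(num2)
--     a = abs(n1)
--     b = abs(n2)
--     while b:
--         a, b = b, a % b
--     lcm = abs(n1 * n2) // a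
--     return list(range(lcm, 101, lcm))
-- ===== Notes on version B (the rewrite author's own statement) =====
-- stated objective: alternative
-- what changed: B computes the gcd by Euclid's algorithm, derives the lcm, and lists its multiples up to 100 directly with range(lcm, 101, lcm), instead of scanning all of 1..100 and testing both remainders.
-- outside the precondition, e.g. on divisibles(101, 0): A returns [], B raises ValueError
import Mathlib
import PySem

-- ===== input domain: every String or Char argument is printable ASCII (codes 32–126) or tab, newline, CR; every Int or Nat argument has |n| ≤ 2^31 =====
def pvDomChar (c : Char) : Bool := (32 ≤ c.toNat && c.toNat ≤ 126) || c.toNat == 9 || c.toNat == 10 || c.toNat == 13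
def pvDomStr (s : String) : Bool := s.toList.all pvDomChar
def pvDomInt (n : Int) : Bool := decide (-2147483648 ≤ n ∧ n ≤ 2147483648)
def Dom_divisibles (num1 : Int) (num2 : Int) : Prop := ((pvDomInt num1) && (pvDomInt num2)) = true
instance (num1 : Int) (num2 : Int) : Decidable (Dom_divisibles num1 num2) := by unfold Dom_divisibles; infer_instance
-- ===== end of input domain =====

-- B replaces A's scan of 1..100 (two remainder tests each) by an Euclid gcd, the lcm,
-- and a direct listing of the lcm's multiples up to 100; equivalence is proved for
-- nonzero inputs (A raises ZeroDivisionError when a scanned number hits a zero divisor).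

-- ===== PORT A =====
def divisibles (num1 : Int) (num2 : Int) : List Int :=
  (PySem.List.pyRange 1 101 1).foldl (fun div number =>
    let numero1 := num1
    let numero2 := num2
    if PySem.Int.mod number numero1 == 0 && PySem.Int.mod number numero2 == 0 then
      div ++ [number]
    else div) []

-- ===== PORT B =====
-- 'while b: a, b = b, a % b' on the absolute values: both operands stay nonnegative,
-- so Python's % coincides with Nat.mod here (exact).
def pvEuclid (a : Nat) (b : Nat) : Nat :=
  if h : b = 0 then a else pvEuclid b (a % b)
decreasing_by exact Nat.mod_lt _ (Nat.pos_of_ne_zero h)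

-- 'abs(n1*n2) // a' has nonnegative dividend and positive divisor, so Python's //
-- coincides with Nat division here (exact).
def divisibles_alt (num1 : Int) (num2 : Int) : List Int :=
  let a := num1.natAbs
  let b := num2.natAbs
  let g := pvEuclid a b
  let lcm : Int := ((num1 * num2).natAbs / g : Nat)
  PySem.List.pyRange lcm 101 lcm

-- ===== PRECONDITION & SPEC =====
-- Pre_ excludes zero inputs: A raises ZeroDivisionError whenever the scan reaches a
-- multiple of the other argument (always, for num1 = 0), and on the remaining zero
-- inputs (num2 = 0 with |num1| > 100, where A returns []) B itself raises ValueError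
-- (range step 0), so no common value exists to claim.
def Pre_divisibles (num1 : Int) (num2 : Int) : Prop := num1 ≠ 0 ∧ num2 ≠ 0
instance (num1 : Int) (num2 : Int) : Decidable (Pre_divisibles num1 num2) := by
  unfold Pre_divisibles; infer_instance
def pvWitness_divisibles : Int × Int := (2, 3)

def Spec_divisibles (num1 : Int) (num2 : Int) (out : List Int) : Prop := out = divisibles_alt num1 num2
instance (num1 : Int) (num2 : Int) (out : List Int) : Decidable (Spec_divisibles num1 num2 out) := by
  unfold Spec_divisibles; infer_instance

-- ===== CLAIM (what is proved, stated in full; the proofs are below) =====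
def Claim_equal_divisibles : Prop := ∀ (num1 : Int) (num2 : Int), Dom_divisibles num1 num2 → Pre_divisibles num1 num2 → Spec_divisibles num1 num2 (divisibles num1 num2)

-- ===== LEMMAS AND PROOFS =====

theorem pvEuclid_eq_gcd (a b : Nat) : pvEuclid a b = Nat.gcd b a := by
  induction b using Nat.strong_induction_on generalizing a with
  | _ b ih =>
    rw [pvEuclid]
    by_cases h : b = 0
    · simp [h]
    · rw [dif_neg h, ih (a % b) (Nat.mod_lt _ (Nat.pos_of_ne_zero h)) b]
      exact (Nat.gcd_rec b a).symm

theorem divisibles_alt_eq (num1 num2 : Int) :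
    divisibles_alt num1 num2 =
      PySem.List.pyRange (Int.lcm num1 num2) 101 (Int.lcm num1 num2) := by
  unfold divisibles_alt
  simp only [pvEuclid_eq_gcd, Int.natAbs_mul]
  rw [Nat.gcd_comm]
  rfl

theorem divisibles_eq_filter (num1 num2 : Int) :
    divisibles num1 num2 =
      (PySem.List.pyRange 1 101 1).filter
        (fun number => PySem.Int.mod number num1 == 0 && PySem.Int.mod number num2 == 0) := by
  unfold divisibles
  rw [PySem.List.foldl_append_if_eq_filter]
  simp

theorem test_iff_lcm_dvd (num1 num2 : Int) (k : Int) :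
    (PySem.Int.mod k num1 == 0 && PySem.Int.mod k num2 == 0) = true ↔
      ((Int.lcm num1 num2 : Int) ∣ k) := by
  simp only [Bool.and_eq_true, beq_iff_eq, PySem.Int.mod_eq_zero_iff_dvd]
  rw [Int.coe_lcm]
  constructor
  · rintro ⟨ha, hb⟩
    exact lcm_dvd ha hb
  · intro h
    exact ⟨(dvd_lcm_left num1 num2).trans h, (dvd_lcm_right num1 num2).trans h⟩

theorem pairwise_lt_pyRange_step (L b : Int) (hL : 0 < L) :
    (PySem.List.pyRange L b L).Pairwise (· < ·) := by
  rw [PySem.List.pyRange_of_pos _ _ hL]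
  refine List.Pairwise.map _ ?_ List.pairwise_lt_range
  intro i j hij
  have : (i : Int) < (j : Int) := by exact_mod_cast hij
  nlinarith

theorem pyRange_step_eq_filter (L : Int) (hL : 1 ≤ L) :
    PySem.List.pyRange L 101 L =
      (PySem.List.pyRange 1 101 1).filter (fun k => decide (L ∣ k)) := by
  have hL0 : (0:Int) < L := by omega
  have pw1 : (PySem.List.pyRange L 101 L).Pairwise (· < ·) :=
    pairwise_lt_pyRange_step L 101 hL0
  have pw2 : ((PySem.List.pyRange 1 101 1).filter (fun k => decide (L ∣ k))).Pairwise (· < ·) :=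
    List.Pairwise.filter _ (PySem.List.pairwise_lt_pyRange_one 1 101)
  have hmem : ∀ x, x ∈ PySem.List.pyRange L 101 L ↔
      x ∈ (PySem.List.pyRange 1 101 1).filter (fun k => decide (L ∣ k)) := by
    intro x
    rw [PySem.List.mem_pyRange_iff_of_pos hL0, List.mem_filter, PySem.List.mem_pyRange_one]
    simp only [decide_eq_true_eq]
    constructor
    · rintro ⟨hx1, hx2, hdvd⟩
      have hdx : L ∣ x := by
        have := hdvd.add (dvd_refl L); simpa using this
      exact ⟨⟨by omega, hx2⟩, hdx⟩
    · rintro ⟨⟨hx1, hx2⟩, hdvd⟩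
      exact ⟨Int.le_of_dvd (by omega) hdvd, hx2, dvd_sub hdvd (dvd_refl L)⟩
  have nod1 : (PySem.List.pyRange L 101 L).Nodup := pw1.imp ne_of_lt
  have nod2 : ((PySem.List.pyRange 1 101 1).filter (fun k => decide (L ∣ k))).Nodup :=
    pw2.imp ne_of_lt
  exact List.eq_of_perm_of_sorted (fun a b _ _ hab hba => absurd hba (not_lt.mpr hab.le))
    pw1 pw2 ((List.perm_ext_iff_of_nodup nod1 nod2).mpr hmem)

-- ===== VERDICT (by name: the statement is the Claim_ definition above) =====
theorem divisibles_spec : Claim_equal_divisibles := by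
  intro num1 num2 _ hpre
  unfold Spec_divisibles
  obtain ⟨h1, h2⟩ := hpre
  rw [divisibles_eq_filter, divisibles_alt_eq]
  have hLpos : 1 ≤ ((Int.lcm num1 num2 : Nat) : Int) := by
    have : Int.lcm num1 num2 ≠ 0 :=
      Nat.lcm_ne_zero (Int.natAbs_ne_zero.mpr h1) (Int.natAbs_ne_zero.mpr h2)
    omega
  rw [pyRange_step_eq_filter _ hLpos]
  apply List.filter_congr
  intro k _
  rw [Bool.eq_iff_iff, test_iff_lcm_dvd num1 num2 k]
  simp
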